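-- pv_equiv track=rewrite | github.com/chboishabba/SensibLaw | src/ontology/wikidata_nat_cohort_b_operator_packet.py | _variance_counts
-- ===== SOURCE A (Python) =====
-- from typing import Any, Mapping, Sequence
--
-- def _stringify(value: Any) -> str:
--     if value is None:
--         return ""
--     return str(value).strip()
--
-- def _variance_counts(rows: Sequence[Mapping[str, Any]]) -> dict[str, int]:
--     counts: dict[str, int] = {}
--     for row in rows:
--         for flag in row.get("variance_flags", []):
--             key = _stringify(flag)
--             if not key:
--                 continue
--             counts[key] = counts.get(key, 0) + 1
--     return {key: counts[key] for key in sorted(counts)}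
-- ===== SOURCE B (Python) =====
-- from typing import Any, Mapping, Sequence
--
--
-- def _stringify(value: Any) -> str:
--     if value is None:
--         return ""
--     return str(value).strip()
--
--
-- def _variance_counts(rows: Sequence[Mapping[str, Any]]) -> dict[str, int]:
--     # Sort the flattened keys first, then count adjacent runs of equal keys:
--     # the result is built directly in sorted-key order (no hash-map counting).
--     flat = sorted(
--         _stringify(flag)
--         for row in rows
--         for flag in row.get("variance_flags", [])
--         if _stringify(flag)
--     )
--     items = []
--     i = 0
--     n = len(flat)
--     while i < n:
--         j = i + 1
--         while j < n and flat[j] == flat[i]: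
--             j += 1
--         items.append((flat[i], j - i))
--         i = j
--     return dict(items)
-- ===== Notes on version B (the rewrite author's own statement) =====
-- stated objective: alternative
-- what changed: Replaces hash-map counting followed by sorting the keys with sorting the flattened stringified flags first and counting adjacent runs of equal keys, so the result dict is built directly in sorted order.
import Mathlib
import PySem

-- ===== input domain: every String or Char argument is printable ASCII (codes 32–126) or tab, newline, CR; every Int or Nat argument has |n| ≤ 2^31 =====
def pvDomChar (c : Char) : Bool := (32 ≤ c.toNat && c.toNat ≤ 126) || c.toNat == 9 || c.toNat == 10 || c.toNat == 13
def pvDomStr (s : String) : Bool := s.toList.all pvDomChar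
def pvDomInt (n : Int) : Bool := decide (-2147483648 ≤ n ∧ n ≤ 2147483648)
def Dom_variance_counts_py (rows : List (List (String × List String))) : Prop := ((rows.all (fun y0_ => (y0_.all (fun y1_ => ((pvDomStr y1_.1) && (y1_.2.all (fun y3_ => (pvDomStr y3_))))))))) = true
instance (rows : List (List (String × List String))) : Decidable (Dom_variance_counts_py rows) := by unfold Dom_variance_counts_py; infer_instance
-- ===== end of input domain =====

-- B changes the algorithm (sort the flattened keys, then count adjacent runs) as an
-- alternative of similar cost; return values are proved identical, no speed is claimed.

-- ===== PORT A =====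
-- _stringify(flag) for a string flag is str(flag).strip() = PySem.Str.strip flag (exact).
-- counts[key] in the final comprehension is ported as getD key 0: key ranges over counts'
-- own keys, so the lookup never hits the KeyError case and getD returns the stored value.
def variance_counts_py (rows : List (List (String × List String))) : List (String × Int) :=
  let counts : PySem.Dict String Int :=
    rows.foldl (fun counts row =>
      ((PySem.Dict.mk row).getD "variance_flags" []).foldl (fun counts flag =>
        let key := PySem.Str.strip flag
        if key == "" then counts
        else counts.insert key (counts.getD key 0 + 1)) counts) PySem.Dict.empty
  (PySem.List.sorted counts.keys (fun k => k) false).map (fun k => (k, counts.getD k 0))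

-- ===== PORT B =====
-- The inner index scan 'j = i+1; while j < n and flat[j] == flat[i]: j += 1' counts the run of
-- elements equal to flat[i] (= takeWhile) and resumes at its end (= dropWhile); runsGo is that
-- outer while loop written as the structural recursion on the remaining suffix flat[i:].
def runsGo : List String → List (String × Int)
  | [] => []
  | x :: xs =>
      (x, (1 : Int) + (xs.takeWhile (fun y => y == x)).length) ::
        runsGo (xs.dropWhile (fun y => y == x))
termination_by l => l.length
decreasing_by
  simpa [Nat.lt_succ_iff] using (List.dropWhile_sublist (l := xs) (fun y => y == x)).length_le

def variance_counts_py_alt (rows : List (List (String × List String))) : List (String × Int) :=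
  let flat := PySem.List.sorted
    (rows.flatMap (fun row =>
      (((PySem.Dict.mk row).getD "variance_flags" []).filter
        (fun f => PySem.Str.strip f != "")).map PySem.Str.strip))
    (fun k => k) false
  (PySem.Dict.ofList (runsGo flat)).items

-- ===== PRECONDITION & SPEC =====
def Spec_variance_counts_py (rows : List (List (String × List String))) (out : List (String × Int)) : Prop := out = variance_counts_py_alt rows
instance (rows : List (List (String × List String))) (out : List (String × Int)) : Decidable (Spec_variance_counts_py rows out) := by unfold Spec_variance_counts_py; infer_instance

-- ===== CLAIM (what is proved, stated in full; the proofs are below) =====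
def Claim_equal_variance_counts_py : Prop := ∀ (rows : List (List (String × List String))), Dom_variance_counts_py rows → Spec_variance_counts_py rows (variance_counts_py rows)

-- ===== LEMMAS AND PROOFS =====

-- the multiset of keys both programs count: stringified non-empty flags, row by row
def ksOf (rows : List (List (String × List String))) : List String :=
  rows.flatMap (fun row =>
    (((PySem.Dict.mk row).getD "variance_flags" []).filter
      (fun f => PySem.Str.strip f != "")).map PySem.Str.strip)

lemma lt_of_mem_dropWhile (x : String) (l : List String)
    (hall : ∀ y ∈ l, x ≤ y) (hp : l.Pairwise (· ≤ ·)) :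
    ∀ y ∈ l.dropWhile (fun y => y == x), x < y := by
  induction l with
  | nil => simp
  | cons a t ih =>
      by_cases hax : (a == x) = true
      · rw [List.dropWhile_cons, if_pos hax]
        exact ih (fun y hy => hall y (List.mem_cons_of_mem _ hy)) hp.of_cons
      · rw [List.dropWhile_cons, if_neg hax]
        intro y hy
        have hxa : x < a := by
          have h1 : x ≤ a := hall a List.mem_cons_self
          have h2 : a ≠ x := by simpa using hax
          exact lt_of_le_of_ne h1 (Ne.symm h2)
        rcases List.mem_cons.mp hy with rfl | hyt
        · exact hxa
        · exact lt_of_lt_of_le hxa ((List.pairwise_cons.mp hp).1 y hyt)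

lemma runsGo_keys_mem (l : List String) (a : String) :
    a ∈ (runsGo l).map Prod.fst ↔ a ∈ l := by
  induction l using runsGo.induct with
  | case1 => simp [runsGo]
  | case2 x xs ih =>
      rw [runsGo]
      simp only [List.map_cons, List.mem_cons]
      constructor
      · rintro (rfl | h)
        · exact Or.inl rfl
        · exact Or.inr ((List.dropWhile_sublist _).mem (ih.mp h))
      · rintro (rfl | h)
        · exact Or.inl rfl
        · rw [← List.takeWhile_append_dropWhile (p := fun y => y == x) (l := xs)] at h
          rcases List.mem_append.mp h with h | h
          · exact Or.inl (by simpa using List.mem_takeWhile_imp h)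
          · exact Or.inr (ih.mpr h)

lemma runsGo_keys_lt (l : List String) (h : l.Pairwise (· ≤ ·)) :
    ((runsGo l).map Prod.fst).Pairwise (· < ·) := by
  induction l using runsGo.induct with
  | case1 => simp [runsGo]
  | case2 x xs ih =>
      rw [runsGo]
      simp only [List.map_cons]
      refine List.pairwise_cons.mpr ⟨?_, ih (List.Pairwise.sublist (List.dropWhile_sublist _) h.of_cons)⟩
      intro y hy
      exact lt_of_mem_dropWhile x xs (List.pairwise_cons.mp h).1 h.of_cons y
        ((runsGo_keys_mem _ y).mp hy)

lemma runsGo_eq_map (l : List String) (h : l.Pairwise (· ≤ ·)) :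
    runsGo l = ((runsGo l).map Prod.fst).map (fun k => (k, (l.count k : Int))) := by
  induction l using runsGo.induct with
  | case1 => simp [runsGo]
  | case2 x xs ih =>
      have hd : (xs.dropWhile (fun y => y == x)).Pairwise (· ≤ ·) :=
        List.Pairwise.sublist (List.dropWhile_sublist _) h.of_cons
      have hlt : ∀ y ∈ xs.dropWhile (fun y => y == x), x < y :=
        lt_of_mem_dropWhile x xs (List.pairwise_cons.mp h).1 h.of_cons
      have hsplit := List.takeWhile_append_dropWhile (p := fun y => y == x) (l := xs)
      rw [runsGo]
      simp only [List.map_cons]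
      congr 1
      · -- the head pair: the run length is the multiplicity of x in the whole list
        have h1 : List.count x (xs.takeWhile (fun y => y == x)) =
            (xs.takeWhile (fun y => y == x)).length :=
          List.count_eq_length.mpr (fun b hb => by
            have hb' : (b == x) = true := List.mem_takeWhile_imp (p := fun y => y == x) hb
            exact (beq_iff_eq.mp hb').symm)
        have h2 : List.count x (xs.dropWhile (fun y => y == x)) = 0 :=
          List.count_eq_zero.mpr (fun hmem => lt_irrefl x (hlt x hmem))
        have h4 : List.count x xs = (xs.takeWhile (fun y => y == x)).length := by
          conv_lhs => rw [← hsplit]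
          rw [List.count_append, h1, h2]
          omega
        rw [List.count_cons_self, h4]
        push_cast
        ring_nf
      · -- the tail: recurse on the remaining suffix, whose counts agree with the full list
        conv_lhs => rw [ih hd]
        refine List.map_congr_left (fun k hk => ?_)
        have hkd : k ∈ xs.dropWhile (fun y => y == x) := (runsGo_keys_mem _ k).mp hk
        have hxk : x < k := hlt k hkd
        have ht0 : List.count k (xs.takeWhile (fun y => y == x)) = 0 :=
          List.count_eq_zero.mpr (fun hmem => by
            have hm' : (k == x) = true := List.mem_takeWhile_imp (p := fun y => y == x) hmem
            exact hxk.ne' (beq_iff_eq.mp hm'))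
        have hxs : List.count k xs = List.count k (xs.dropWhile (fun y => y == x)) := by
          conv_lhs => rw [← hsplit]
          rw [List.count_append, ht0, Nat.zero_add]
        have hcnt : List.count k (x :: xs) = List.count k (xs.dropWhile (fun y => y == x)) := by
          rw [List.count_cons, hxs]
          simp [hxk.ne]
        rw [hcnt]

lemma portA_char (rows : List (List (String × List String))) :
    variance_counts_py rows =
      (PySem.List.sorted (PySem.Set.ofList (ksOf rows)) (fun k => k) false).map
        (fun k => (k, ((ksOf rows).count k : Int))) := by
  have hcounts : rows.foldl (fun counts row =>
      ((PySem.Dict.mk row).getD "variance_flags" []).foldl (fun counts flag =>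
        let key := PySem.Str.strip flag
        if key == "" then counts
        else counts.insert key (counts.getD key 0 + 1)) counts) PySem.Dict.empty =
      PySem.Dict.counter (ksOf rows) := by
    rw [← PySem.Dict.foldl_insert_getD_add_one_eq_counter]
    unfold ksOf
    rw [List.foldl_flatMap]
    refine PySem.List.foldl_congr_mem _ _ _ _ (fun acc row hrow => ?_)
    rw [List.foldl_map,
      ← PySem.List.foldl_if_eq_foldl_filter (p := fun f => PySem.Str.strip f != "")
        (f := fun (d : PySem.Dict String Int) f => d.insert (PySem.Str.strip f) (d.getD (PySem.Str.strip f) 0 + 1))]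
    refine PySem.List.foldl_congr_mem _ _ _ _ (fun d flag hflag => ?_)
    by_cases hc : (PySem.Str.strip flag == "") = true
    · simp [hc, bne]
    · simp [hc, bne]
  simp only [variance_counts_py]
  rw [hcounts]
  simp only [PySem.Dict.keys_counter, PySem.Dict.getD_counter]

lemma portB_char (rows : List (List (String × List String))) :
    variance_counts_py_alt rows = runsGo (PySem.List.sorted (ksOf rows) (fun k => k) false) := by
  simp only [variance_counts_py_alt]
  unfold ksOf
  set L := runsGo (PySem.List.sorted (rows.flatMap (fun row =>
      (((PySem.Dict.mk row).getD "variance_flags" []).filter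
        (fun f => PySem.Str.strip f != "")).map PySem.Str.strip)) (fun k => k) false) with hL
  have hs : (PySem.List.sorted (rows.flatMap (fun row =>
      (((PySem.Dict.mk row).getD "variance_flags" []).filter
        (fun f => PySem.Str.strip f != "")).map PySem.Str.strip)) (fun k => k) false).Pairwise
      (· ≤ ·) := by
    simpa using PySem.List.sorted_pairwise (rows.flatMap (fun row =>
      (((PySem.Dict.mk row).getD "variance_flags" []).filter
        (fun f => PySem.Str.strip f != "")).map PySem.Str.strip)) (fun k => k)
  have hnd : (L.map Prod.fst).Nodup :=
    (runsGo_keys_lt _ hs).imp (fun h => h.ne)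
  show (PySem.Dict.ofList L).items = L
  simp only [PySem.Dict.ofList, PySem.Dict.update]
  rw [PySem.Dict.items_foldl_insert_fresh L Prod.fst Prod.snd PySem.Dict.empty
    (fun a _ => PySem.Dict.contains_empty a.1) hnd]
  simp [PySem.Dict.empty]

-- ===== VERDICT (by name: the statement is the Claim_ definition above) =====
theorem variance_counts_py_spec : Claim_equal_variance_counts_py := by
  intro rows _
  unfold Spec_variance_counts_py
  rw [portA_char, portB_char]
  set S := PySem.List.sorted (ksOf rows) (fun k => k) false with hS
  have hs : S.Pairwise (· ≤ ·) := by
    simpa [hS] using PySem.List.sorted_pairwise (ksOf rows) (fun k => k)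
  have hkeys : PySem.List.sorted (PySem.Set.ofList (ksOf rows)) (fun k => k) false =
      (runsGo S).map Prod.fst := by
    apply PySem.List.sorted_eq_of_perm_of_pairwise_lt
    · refine (List.perm_ext_iff_of_nodup
        ((runsGo_keys_lt S hs).imp (fun h => h.ne)) (PySem.Set.nodup_ofList _)).mpr ?_
      intro a
      rw [runsGo_keys_mem, PySem.Set.mem_ofList]
      exact (PySem.List.sorted_perm (ksOf rows) (fun k => k) false).mem_iff
    · simpa using runsGo_keys_lt S hs
  conv_rhs => rw [runsGo_eq_map S hs]
  rw [hkeys]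
  refine List.map_congr_left (fun k _ => ?_)
  rw [(PySem.List.sorted_perm (ksOf rows) (fun k => k) false).count_eq k]
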